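-- pv_equiv track=rewrite | github.com/kimsungmin1011/Algorithm | 프로그래머스/1/250137. ［PCCP 기출문제］ 1번 ／ 붕대 감기/［PCCP 기출문제］ 1번 ／ 붕대 감기.py | solution
-- ===== SOURCE A (Python) =====
-- def solution(bandage, health, attacks):
--     btime,shp,php=bandage[0], bandage[1], bandage[2]
--     ctime, chp = 0, health
--
--     for i in range(len(attacks)):
--         atime,ahp=attacks[i][0], attacks[i][1]
--         chp+=(atime-ctime)*shp + (atime-ctime)//btime*php
--         if chp>health:
--             chp=health
--         ctime=atime+1
--         chp-=ahp
--         if chp<=0: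
--             return -1
--
--     return chp
-- ===== SOURCE B (Python) =====
-- def solution(bandage, health, attacks):
--     # Staged-passes formulation: build the per-attack net-change list, its prefix
--     # sums p_i, and the running maximum m_i of the pre-damage prefix values; the
--     # hp after attack i is health + p_i - m_i, with no clamped hp state at all.
--     btime, shp, php = bandage[0], bandage[1], bandage[2]
--     times = [a[0] for a in attacks]
--     damages = [a[1] for a in attacks]
--     gaps = [t - prev - 1 for prev, t in zip([-1] + times, times)]
--     deltas = [g * shp + g // btime * php - d for g, d in zip(gaps, damages)]
--     prefixes = []
--     p = 0
--     for d in deltas: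
--         p += d
--         prefixes.append(p)
--     peaks = []
--     m = 0
--     for x in [p + d for p, d in zip(prefixes, damages)]:
--         m = max(m, x)
--         peaks.append(m)
--     hps = [health + p - m for p, m in zip(prefixes, peaks)]
--     for hp in hps:
--         if hp <= 0:
--             return -1
--     return hps[-1] if hps else health
-- ===== Notes on version B (the rewrite author's own statement) =====
-- stated objective: alternative
-- what changed: B replaces A's single stateful loop that simulates the clamped hp (add heal, cap at health, subtract damage per attack) by a staged-passes pipeline: it first builds the lists of gaps, per-attack net changes, prefix sums p_i and running maxima m_i of the pre-damage prefix values, then reads each hp as health + p_i - m_i and scans that list once; no clamped hp state is ever stored.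
-- outside the precondition, e.g. on solution([1, 1, 1], 1, [[0, 100], [5]]): A returns -1, B raises IndexError
import Mathlib
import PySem

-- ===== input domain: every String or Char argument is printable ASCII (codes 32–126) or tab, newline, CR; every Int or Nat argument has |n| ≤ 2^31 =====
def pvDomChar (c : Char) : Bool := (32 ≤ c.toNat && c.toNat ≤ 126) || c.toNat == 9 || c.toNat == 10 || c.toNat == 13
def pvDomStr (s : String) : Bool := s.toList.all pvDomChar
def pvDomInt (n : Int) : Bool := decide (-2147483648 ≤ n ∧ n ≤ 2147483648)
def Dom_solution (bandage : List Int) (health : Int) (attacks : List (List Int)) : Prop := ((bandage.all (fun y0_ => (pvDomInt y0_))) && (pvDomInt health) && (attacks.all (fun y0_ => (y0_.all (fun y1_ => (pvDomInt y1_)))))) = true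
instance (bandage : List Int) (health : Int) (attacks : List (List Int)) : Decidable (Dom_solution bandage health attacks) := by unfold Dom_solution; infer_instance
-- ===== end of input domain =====

-- B replaces A's single stateful loop (clamped hp simulation) by a staged-passes
-- pipeline over lists (gaps, net changes, prefix sums, running peaks, final scan);
-- same O(n), objective: alternative.

-- ===== PORT A =====
-- A's for-loop over attacks with state (ctime, chp); IndexError on short lists is
-- excluded by Pre_solution, so the `.getD 0` after pyGet? is never the value used.
def solution_go (btime shp php health : Int) : List (List Int) → Int → Int → Int
  | [], _, chp => chp
  | atk :: rest, ctime, chp =>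
    let atime := (PySem.List.pyGet? atk 0).getD 0
    let ahp := (PySem.List.pyGet? atk 1).getD 0
    let chp1 := chp + (atime - ctime) * shp + (PySem.Int.floordiv (atime - ctime) btime) * php
    let chp2 := if chp1 > health then health else chp1
    let chp3 := chp2 - ahp
    if chp3 ≤ 0 then -1 else solution_go btime shp php health rest (atime + 1) chp3

def solution (bandage : List Int) (health : Int) (attacks : List (List Int)) : Int :=
  let btime := (PySem.List.pyGet? bandage 0).getD 0
  let shp := (PySem.List.pyGet? bandage 1).getD 0
  let php := (PySem.List.pyGet? bandage 2).getD 0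
  solution_go btime shp php health attacks 0 health

-- ===== PORT B =====
-- pvPrefix p ds: Source B's first accumulation loop (prefix sums of the deltas).
def pvPrefix (p : Int) : List Int → List Int
  | [] => []
  | d :: rest => (p + d) :: pvPrefix (p + d) rest

-- pvPeaks m xs: Source B's second accumulation loop (running maxima, seeded with 0).
def pvPeaks (m : Int) : List Int → List Int
  | [] => []
  | x :: rest => (max m x) :: pvPeaks (max m x) rest

-- pvFinal d hps: Source B's final scan (first hp ≤ 0 gives -1, else last hp, else d).
def pvFinal (dflt : Int) : List Int → Int
  | [] => dflt
  | hp :: rest => if hp ≤ 0 then -1 else if rest.isEmpty then hp else pvFinal dflt rest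

def solution_alt (bandage : List Int) (health : Int) (attacks : List (List Int)) : Int :=
  let btime := (PySem.List.pyGet? bandage 0).getD 0
  let shp := (PySem.List.pyGet? bandage 1).getD 0
  let php := (PySem.List.pyGet? bandage 2).getD 0
  let times := attacks.map (fun a => (PySem.List.pyGet? a 0).getD 0)
  let damages := attacks.map (fun a => (PySem.List.pyGet? a 1).getD 0)
  let gaps := List.zipWith (fun prev t => t - prev - 1) (-1 :: times) times
  let deltas := List.zipWith (fun g d => g * shp + (PySem.Int.floordiv g btime) * php - d) gaps damages
  let prefixes := pvPrefix 0 deltas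
  let peaks := pvPeaks 0 (List.zipWith (fun p d => p + d) prefixes damages)
  let hps := List.zipWith (fun p m => health + p - m) prefixes peaks
  pvFinal health hps

-- ===== PRECONDITION & SPEC =====
-- Exactly where Python A returns normally: bandage must have the 3 indexed entries,
-- every attack must have its 2 indexed entries, and (unless there are no attacks,
-- so the division is never reached) bandage[0] must be nonzero (ZeroDivisionError).
-- Pre_ is slightly conservative: when an early -1 return precedes a malformed later
-- attack, A returns -1 without raising; B's staged passes index every row and raise there.
def Pre_solution (bandage : List Int) (health : Int) (attacks : List (List Int)) : Prop :=
  3 ≤ bandage.length ∧ (attacks = [] ∨ bandage.getD 0 0 ≠ 0) ∧ ∀ a ∈ attacks, 2 ≤ a.length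
instance (bandage : List Int) (health : Int) (attacks : List (List Int)) : Decidable (Pre_solution bandage health attacks) := by unfold Pre_solution; infer_instance

def pvWitness_solution : List Int × Int × List (List Int) := ([3, 2, 5], 20, [[4, 7], [8, 6]])

def Spec_solution (bandage : List Int) (health : Int) (attacks : List (List Int)) (out : Int) : Prop := out = solution_alt bandage health attacks
instance (bandage : List Int) (health : Int) (attacks : List (List Int)) (out : Int) : Decidable (Spec_solution bandage health attacks out) := by unfold Spec_solution; infer_instance

-- ===== CLAIM (what is proved, stated in full; the proofs are below) =====
def Claim_equal_solution : Prop := ∀ (bandage : List Int) (health : Int) (attacks : List (List Int)), Dom_solution bandage health attacks → Pre_solution bandage health attacks → Spec_solution bandage health attacks (solution bandage health attacks)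

-- ===== LEMMAS AND PROOFS =====

-- Proof-side bridge: a single recursion with state (prev, p, m); A's loop and B's
-- pipeline are each shown equal to it.
def go2 (btime shp php health : Int) : List (List Int) → Int → Int → Int → Int
  | [], _, p, m => health + p - m
  | atk :: rest, prev, p, m =>
    let t := (PySem.List.pyGet? atk 0).getD 0
    let d := (PySem.List.pyGet? atk 1).getD 0
    let gap := t - prev - 1
    let p1 := p + gap * shp + (PySem.Int.floordiv gap btime) * php - d
    let m1 := if p1 + d > m then p1 + d else m
    if health + p1 - m1 ≤ 0 then -1 else go2 btime shp php health rest t p1 m1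

-- A's state (ctime, chp) and the bridge state (prev, p, m) are related by
-- ctime = prev + 1 and chp = health + p - m.
theorem solution_go_eq_go2 (btime shp php health : Int) (attacks : List (List Int)) :
    ∀ (ctime chp prev p m : Int), ctime = prev + 1 → chp = health + p - m →
    solution_go btime shp php health attacks ctime chp
      = go2 btime shp php health attacks prev p m := by
  induction attacks with
  | nil => intro ctime chp prev p m hc hh; simp [solution_go, go2, hh]
  | cons atk rest ih =>
    intro ctime chp prev p m hc hh
    simp only [solution_go, go2]
    set t := (PySem.List.pyGet? atk 0).getD 0 with ht
    set d := (PySem.List.pyGet? atk 1).getD 0 with hd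
    have hgap : t - ctime = t - prev - 1 := by omega
    set fd := PySem.Int.floordiv (t - prev - 1) btime with hfd
    rw [hgap]
    have key : (if (chp + (t - prev - 1) * shp + fd * php) > health then health
                 else (chp + (t - prev - 1) * shp + fd * php)) - d
        = health + (p + (t - prev - 1) * shp + fd * php - d)
            - (if (p + (t - prev - 1) * shp + fd * php - d) + d > m
                 then (p + (t - prev - 1) * shp + fd * php - d) + d else m) := by
      split_ifs <;> omega
    rw [key]
    split_ifs <;> first
      | rfl
      | exact ih _ _ _ _ _ (by omega) rfl

theorem if_gt_eq_max (a b : Int) : (if b > a then b else a) = max a b := by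
  rw [max_def]; split_ifs <;> omega

theorem pvPrefix_nil_iff (p : Int) (l : List Int) : pvPrefix p l = [] ↔ l = [] := by
  cases l <;> simp [pvPrefix]

theorem pvPeaks_nil_iff (m : Int) (l : List Int) : pvPeaks m l = [] ↔ l = [] := by
  cases l <;> simp [pvPeaks]

-- B's pipeline, generalized over the accumulated state (prev, p, m) and the
-- final default, equals the bridge recursion.
theorem pipeline_eq_go2 (btime shp php health : Int) :
    ∀ (attacks : List (List Int)) (prev p m dflt : Int),
    pvFinal dflt
      (List.zipWith (fun p m => health + p - m)
        (pvPrefix p (List.zipWith (fun g d => g * shp + (PySem.Int.floordiv g btime) * php - d)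
          (List.zipWith (fun prev t => t - prev - 1)
            (prev :: attacks.map (fun a => (PySem.List.pyGet? a 0).getD 0))
            (attacks.map (fun a => (PySem.List.pyGet? a 0).getD 0)))
          (attacks.map (fun a => (PySem.List.pyGet? a 1).getD 0))))
        (pvPeaks m (List.zipWith (fun p d => p + d)
          (pvPrefix p (List.zipWith (fun g d => g * shp + (PySem.Int.floordiv g btime) * php - d)
            (List.zipWith (fun prev t => t - prev - 1)
              (prev :: attacks.map (fun a => (PySem.List.pyGet? a 0).getD 0))
              (attacks.map (fun a => (PySem.List.pyGet? a 0).getD 0)))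
            (attacks.map (fun a => (PySem.List.pyGet? a 1).getD 0))))
          (attacks.map (fun a => (PySem.List.pyGet? a 1).getD 0)))))
      = if attacks = [] then dflt else go2 btime shp php health attacks prev p m := by
  intro attacks
  induction attacks with
  | nil => intro prev p m dflt; simp [pvPrefix, pvPeaks, pvFinal]
  | cons atk rest ih =>
    intro prev p m dflt
    simp only [List.map_cons, List.zipWith_cons_cons, pvPrefix, pvPeaks, pvFinal, go2,
      if_gt_eq_max]
    rw [if_neg (List.cons_ne_nil atk rest)]
    set t := (PySem.List.pyGet? atk 0).getD 0 with ht
    set d := (PySem.List.pyGet? atk 1).getD 0 with hd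
    rw [show p + ((t - prev - 1) * shp + PySem.Int.floordiv (t - prev - 1) btime * php - d)
        = p + (t - prev - 1) * shp + PySem.Int.floordiv (t - prev - 1) btime * php - d from by ring]
    set p1 := p + (t - prev - 1) * shp + PySem.Int.floordiv (t - prev - 1) btime * php - d with hp1
    set m1 := max m (p1 + d) with hm1
    by_cases hdead : health + p1 - m1 ≤ 0
    · simp only [if_pos hdead]
    · simp only [if_neg hdead]
      rcases eq_or_ne rest [] with hr | hr
      · subst hr
        simp [go2, pvPrefix, pvPeaks]
      · rw [if_neg (by
          simp [List.isEmpty_iff, List.zipWith_eq_nil_iff, pvPrefix_nil_iff, pvPeaks_nil_iff,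
            List.map_eq_nil_iff, hr])]
        exact (ih t p1 m1 dflt).trans (if_neg hr)

-- ===== VERDICT (by name: the statement is the Claim_ definition above) =====
theorem solution_spec : Claim_equal_solution := by
  intro bandage health attacks _ _
  unfold Spec_solution solution solution_alt
  rw [solution_go_eq_go2 _ _ _ _ _ 0 health (-1) 0 0 (by omega) (by omega),
    pipeline_eq_go2]
  rcases eq_or_ne attacks [] with h | h
  · subst h; simp [go2]
  · rw [if_neg h]
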